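-- pv_equiv track=rewrite | github.com/syncerpn/leetcode | 3751_total_waviness_of_numbers_in_range_i.py | totalWaviness
-- ===== SOURCE A (Python) =====
-- def totalWaviness(num1: int, num2: int) -> int:
--     ans = 0
--     for a in range(num1, num2+1):
--         s = str(a)
--         for i in range(1, len(s)-1):
--             if (s[i] > s[i-1] and s[i] > s[i+1]) or (s[i] < s[i-1] and s[i] < s[i+1]):
--                 ans += 1
--     return ans
-- ===== SOURCE B (Python) =====
-- def totalWaviness(num1: int, num2: int) -> int:
--     # Single forward scan per number: count strict sign alternations between
--     # consecutive digit differences instead of testing each interior index.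
--     total = 0
--     for a in range(num1, num2 + 1):
--         s = str(a)
--         prev_sign = 0
--         for left, right in zip(s, s[1:]):
--             sign = (right > left) - (right < left)
--             if prev_sign * sign == -1:
--                 total += 1
--             prev_sign = sign
--     return total
-- ===== Notes on version B (the rewrite author's own statement) =====
-- stated objective: alternative
-- what changed: Per number, instead of indexing each interior position and comparing it with both neighbours, B makes one forward pass over adjacent character pairs, computes the comparison sign of each pair and counts strict sign alternations (a local extremum is exactly a +/- or -/+ flip); no random-access indexing remains.
import Mathlib
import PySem

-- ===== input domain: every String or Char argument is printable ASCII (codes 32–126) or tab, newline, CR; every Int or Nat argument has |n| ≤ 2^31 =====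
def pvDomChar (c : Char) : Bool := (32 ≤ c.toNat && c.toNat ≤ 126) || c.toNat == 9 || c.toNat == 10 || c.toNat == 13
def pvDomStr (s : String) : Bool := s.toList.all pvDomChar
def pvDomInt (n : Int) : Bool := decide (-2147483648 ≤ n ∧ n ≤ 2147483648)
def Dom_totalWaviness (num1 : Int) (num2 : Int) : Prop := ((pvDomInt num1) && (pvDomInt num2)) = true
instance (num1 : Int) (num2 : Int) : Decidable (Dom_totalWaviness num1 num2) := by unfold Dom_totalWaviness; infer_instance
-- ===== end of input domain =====

-- B counts local extrema by one forward scan over adjacent-pair comparison signs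
-- instead of A's per-index triple test; same cost, different traversal (alternative).

-- ===== PORT A =====
def totalWaviness (num1 : Int) (num2 : Int) : Int :=
  (PySem.List.pyRange num1 (num2 + 1) 1).foldl (fun ans a =>
    let s := PySem.Int.toChars a
    (PySem.List.pyRange 1 (PySem.List.len s - 1) 1).foldl (fun ans i =>
      if (PySem.List.pyGetD s (i - 1) ' ' < PySem.List.pyGetD s i ' ' ∧
          PySem.List.pyGetD s (i + 1) ' ' < PySem.List.pyGetD s i ' ') ∨
         (PySem.List.pyGetD s i ' ' < PySem.List.pyGetD s (i - 1) ' ' ∧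
          PySem.List.pyGetD s i ' ' < PySem.List.pyGetD s (i + 1) ' ')
      then ans + 1 else ans) ans) 0

-- ===== PORT B =====
-- sign = (right > left) - (right < left)
def pvSgn (l r : Char) : Int := (if l < r then 1 else 0) - (if r < l then 1 else 0)

def totalWaviness_alt (num1 : Int) (num2 : Int) : Int :=
  (PySem.List.pyRange num1 (num2 + 1) 1).foldl (fun total a =>
    let s := PySem.Int.toChars a
    ((s.zip (PySem.List.slice s (some 1) none)).foldl
      (fun (st : Int × Int) pr =>
        let sign := pvSgn pr.1 pr.2
        ((if st.2 * sign = -1 then st.1 + 1 else st.1), sign))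
      (total, 0)).1) 0

-- ===== PRECONDITION & SPEC =====
def Spec_totalWaviness (num1 : Int) (num2 : Int) (out : Int) : Prop := out = totalWaviness_alt num1 num2
instance (num1 : Int) (num2 : Int) (out : Int) : Decidable (Spec_totalWaviness num1 num2 out) := by unfold Spec_totalWaviness; infer_instance

-- ===== CLAIM (what is proved, stated in full; the proofs are below) =====
def Claim_equal_totalWaviness : Prop := ∀ (num1 : Int) (num2 : Int), Dom_totalWaviness num1 num2 → Spec_totalWaviness num1 num2 (totalWaviness num1 num2)

-- ===== LEMMAS AND PROOFS =====

-- waviness of one character list, recursively over leading triples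
def pvTri : List Char → Int
  | a :: b :: c :: rest =>
      (if (a < b ∧ c < b) ∨ (b < a ∧ b < c) then 1 else 0) + pvTri (b :: c :: rest)
  | _ => 0

-- B's scan with a given previous sign and previous character
def pvGo (ps : Int) (p : Char) : List Char → Int
  | [] => 0
  | c :: rest => (if ps * pvSgn p c = -1 then 1 else 0) + pvGo (pvSgn p c) c rest

theorem pvGo_sgn_eq_tri (rest : List Char) : ∀ a b : Char, pvGo (pvSgn a b) b rest = pvTri (a :: b :: rest) := by
  induction rest with
  | nil => intro a b; simp [pvGo, pvTri]
  | cons c rest ih =>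
      intro a b
      have hsgn : ((pvSgn a b * pvSgn b c = -1) ↔ ((a < b ∧ c < b) ∨ (b < a ∧ b < c))) := by
        unfold pvSgn
        by_cases hab : a < b <;> by_cases hba : b < a <;>
          by_cases hbc : b < c <;> by_cases hcb : c < b <;>
            first
              | exact absurd hba (asymm hab)
              | exact absurd hcb (asymm hbc)
              | norm_num [hab, hba, hbc, hcb]
      simp only [pvGo, pvTri, ih b c]
      congr 1
      simp [hsgn]

theorem pvGo_zero_eq_tri (rest : List Char) (x : Char) : pvGo 0 x rest = pvTri (x :: rest) := by
  cases rest with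
  | nil => simp [pvGo, pvTri]
  | cons y rest' => simp only [pvGo, pvGo_sgn_eq_tri rest' x y]; simp

-- B's inner fold computes acc + pvTri
theorem pvB_fold (rest : List Char) : ∀ (p : Char) (ps acc : Int),
    ((List.zip (p :: rest) rest).foldl
      (fun (st : Int × Int) pr =>
        ((if st.2 * pvSgn pr.1 pr.2 = -1 then st.1 + 1 else st.1), pvSgn pr.1 pr.2))
      (acc, ps)).1 = acc + pvGo ps p rest := by
  induction rest with
  | nil => intro p ps acc; simp [pvGo]
  | cons c rest ih =>
      intro p ps acc
      simp only [List.zip_cons_cons, List.foldl_cons, ih c (pvSgn p c), pvGo]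
      split <;> ring

theorem pvB_inner (s : List Char) (acc : Int) :
    ((s.zip (PySem.List.slice s (some 1) none)).foldl
      (fun (st : Int × Int) pr =>
        ((if st.2 * pvSgn pr.1 pr.2 = -1 then st.1 + 1 else st.1), pvSgn pr.1 pr.2))
      (acc, 0)).1 = acc + pvTri s := by
  have hslice : PySem.List.slice s (some (1 : Int)) none = s.drop 1 :=
    PySem.List.slice_from s (by norm_num)
  cases s with
  | nil => simp [hslice, pvTri]
  | cons x rest =>
      have : (x :: rest).drop 1 = rest := rfl
      rw [hslice, this, pvB_fold rest x 0 acc, pvGo_zero_eq_tri]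

-- index-count over range as pvTri
theorem pvCnt_eq_tri (s : List Char) :
    ((List.range (s.length - 2)).countP (fun k =>
      decide ((s.getD k ' ' < s.getD (k + 1) ' ' ∧ s.getD (k + 1 + 1) ' ' < s.getD (k + 1) ' ') ∨
              (s.getD (k + 1) ' ' < s.getD k ' ' ∧ s.getD (k + 1) ' ' < s.getD (k + 1 + 1) ' ')))
     : Int) = pvTri s := by
  match s with
  | [] => simp [pvTri]
  | [a] => simp [pvTri]
  | [a, b] => simp [pvTri]
  | a :: b :: c :: rest =>
      have hlen : (a :: b :: c :: rest).length - 2 = ((b :: c :: rest).length - 2) + 1 := by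
        simp [List.length_cons]
      rw [hlen, List.range_succ_eq_map, List.countP_cons, List.countP_map]
      have hhead : (decide (((a :: b :: c :: rest).getD 0 ' ' < (a :: b :: c :: rest).getD (0 + 1) ' ' ∧
            (a :: b :: c :: rest).getD (0 + 1 + 1) ' ' < (a :: b :: c :: rest).getD (0 + 1) ' ') ∨
           ((a :: b :: c :: rest).getD (0 + 1) ' ' < (a :: b :: c :: rest).getD 0 ' ' ∧
            (a :: b :: c :: rest).getD (0 + 1) ' ' < (a :: b :: c :: rest).getD (0 + 1 + 1) ' '))) =
          decide ((a < b ∧ c < b) ∨ (b < a ∧ b < c)) := by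
        simp [List.getD]
      have htail : ((List.range ((b :: c :: rest).length - 2)).countP
          ((fun k => decide (((a :: b :: c :: rest).getD k ' ' < (a :: b :: c :: rest).getD (k + 1) ' ' ∧
              (a :: b :: c :: rest).getD (k + 1 + 1) ' ' < (a :: b :: c :: rest).getD (k + 1) ' ') ∨
             ((a :: b :: c :: rest).getD (k + 1) ' ' < (a :: b :: c :: rest).getD k ' ' ∧
              (a :: b :: c :: rest).getD (k + 1) ' ' < (a :: b :: c :: rest).getD (k + 1 + 1) ' '))) ∘ (· + 1))) =
          (List.range ((b :: c :: rest).length - 2)).countP (fun k =>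
            decide (((b :: c :: rest).getD k ' ' < (b :: c :: rest).getD (k + 1) ' ' ∧
              (b :: c :: rest).getD (k + 1 + 1) ' ' < (b :: c :: rest).getD (k + 1) ' ') ∨
             ((b :: c :: rest).getD (k + 1) ' ' < (b :: c :: rest).getD k ' ' ∧
              (b :: c :: rest).getD (k + 1) ' ' < (b :: c :: rest).getD (k + 1 + 1) ' '))) := by
        apply List.countP_congr
        intro k _
        simp only [Function.comp_apply, List.getD_cons_succ]
      rw [hhead, htail]
      have hih := pvCnt_eq_tri (b :: c :: rest)
      push_cast
      rw [hih]
      simp only [pvTri]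
      by_cases hP : (a < b ∧ c < b) ∨ (b < a ∧ b < c) <;> simp [hP] <;> ring

-- A's inner fold computes acc + pvTri
theorem pvA_inner (s : List Char) (acc : Int) :
    (PySem.List.pyRange 1 (PySem.List.len s - 1) 1).foldl (fun ans i =>
      if (PySem.List.pyGetD s (i - 1) ' ' < PySem.List.pyGetD s i ' ' ∧
          PySem.List.pyGetD s (i + 1) ' ' < PySem.List.pyGetD s i ' ') ∨
         (PySem.List.pyGetD s i ' ' < PySem.List.pyGetD s (i - 1) ' ' ∧
          PySem.List.pyGetD s i ' ' < PySem.List.pyGetD s (i + 1) ' ')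
      then ans + 1 else ans) acc = acc + pvTri s := by
  rw [PySem.List.foldl_ite_add_one]
  rw [← pvCnt_eq_tri s]
  congr 1
  rw [PySem.List.len_eq, PySem.List.pyRange_one, List.countP_map]
  have hlen : ((s.length : Int) - 1 - 1).toNat = s.length - 2 := by omega
  rw [hlen]
  congr 1
  apply List.countP_congr
  intro k _
  have h2 : (1 : Int) + (k : Int) = (((k + 1 : Nat)) : Int) := by push_cast; ring
  have h1 : (((k + 1 : Nat)) : Int) - 1 = ((k : Nat) : Int) := by push_cast; ring
  have h3 : (((k + 1 : Nat)) : Int) + 1 = (((k + 1 + 1 : Nat)) : Int) := by push_cast; ring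
  simp only [Function.comp_apply, h2, h1, h3, PySem.List.pyGetD_natCast]

-- ===== VERDICT (by name: the statement is the Claim_ definition above) =====
theorem totalWaviness_spec : Claim_equal_totalWaviness := by
  intro num1 num2 _
  unfold Spec_totalWaviness totalWaviness totalWaviness_alt
  apply PySem.List.foldl_congr_mem
  intro acc a _
  simp only [pvA_inner, pvB_inner]
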